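-- pv_equiv track=rewrite | github.com/gsanahi/Glovo-Any | Python/Varios/list_utils.py | find_streak
-- ===== SOURCE A (Python) =====
-- def find_streak(list, element, size):
--     """
--     Devuelve True si en list hay size o más elementos SEGUIDOS
--     False en caso contrario y también si size <= 0
--     """
--     if size > 0:
--         # Inicializo el indice, el contador, y el indicador de racha
--         index = 0
--         count = 0
--         streak = False
--
--         # Mientras no haya ecnontrado a size elements seguidos y la lista no se haya terminado
--         while count < size and index < len(list):
--
--             if list[index] == element:
--                 # si lo encuentro, activo el indicador de rachas y incremento el contador
--                 streak = True
--                 count = count + 1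
--             else:
--                 # si no lo encuentro, desactivo indicador de rachas y pongo contador a cero
--                 streak = False
--                 count = 0
--
--             # avanzo al siguiente elemento (incremento indice)
--             index = index + 1
--
--         # devolvemos el resultado de comparar el contador con size,
--         # SIEMPRE Y CUANDO ESTEMOS EN RACHA
--         if streak == True:
--             return count >= size
--         else:
--             return False
--
--     else:
--         return False
-- ===== SOURCE B (Python) =====
-- def find_streak(list, element, size):
--     if size <= 0:
--         return False
--     # run-length encode the list (maximal runs of consecutive equal elements), then test the runs
--     runs = []
--     for x in reversed(list):
--         if runs and runs[-1][0] == x: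
--             runs[-1] = (x, runs[-1][1] + 1)
--         else:
--             runs.append((x, 1))
--     return any(k == element and n >= size for k, n in runs)
-- ===== Notes on version B (the rewrite author's own statement) =====
-- stated objective: alternative
-- what changed: Replaced A's stateful index/count/streak while-loop scan with a run-length-encode-then-test decomposition: build the maximal runs of consecutive equal elements, then check whether any run of `element` has length >= size.
import Mathlib
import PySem

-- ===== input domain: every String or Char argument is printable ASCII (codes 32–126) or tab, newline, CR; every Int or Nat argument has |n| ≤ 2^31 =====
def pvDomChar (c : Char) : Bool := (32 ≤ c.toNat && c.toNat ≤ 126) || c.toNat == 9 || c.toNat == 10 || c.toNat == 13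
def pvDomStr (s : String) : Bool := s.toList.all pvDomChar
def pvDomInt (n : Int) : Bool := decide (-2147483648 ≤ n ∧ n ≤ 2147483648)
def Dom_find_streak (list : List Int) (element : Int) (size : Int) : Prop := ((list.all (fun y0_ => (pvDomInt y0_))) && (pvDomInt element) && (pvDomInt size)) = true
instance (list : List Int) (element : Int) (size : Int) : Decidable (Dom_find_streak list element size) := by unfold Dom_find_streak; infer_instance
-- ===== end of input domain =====

-- B replaces A's stateful index/count/streak while-loop with a run-length-encode-then-test decomposition (alternative, same cost).


-- ===== PORT A =====
-- the while loop: state (count, streak), scanning the list left to right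
def pvLoopA (element size : Int) : List Int → Int → Bool → Int × Bool
  | xs, count, streak =>
    if count < size then
      match xs with
      | [] => (count, streak)
      | x :: rest =>
        if x = element then pvLoopA element size rest (count + 1) true
        else pvLoopA element size rest 0 false
    else (count, streak)

def find_streak (list : List Int) (element : Int) (size : Int) : Bool :=
  if size > 0 then
    let r := pvLoopA element size list 0 false
    if r.2 then decide (size ≤ r.1) else false
  else false

-- ===== PORT B =====
-- one step of B's run-length encoding over reversed(list); B appends/merges at the tail of its runs list,
-- the port prepends/merges at the head (the same runs in the mirrored order, which the final `any` ignores)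
def pvRleStep (x : Int) (runs : List (Int × Int)) : List (Int × Int) :=
  match runs with
  | (k, n) :: rest => if k = x then (x, n + 1) :: rest else (x, 1) :: (k, n) :: rest
  | [] => [(x, 1)]

def pvRle (xs : List Int) : List (Int × Int) := xs.foldr pvRleStep []

def find_streak_alt (list : List Int) (element : Int) (size : Int) : Bool :=
  if size ≤ 0 then false
  else (pvRle list).any (fun p => p.1 == element && decide (size ≤ p.2))

-- ===== PRECONDITION & SPEC =====
def Spec_find_streak (list : List Int) (element : Int) (size : Int) (out : Bool) : Prop := out = find_streak_alt list element size
instance (list : List Int) (element : Int) (size : Int) (out : Bool) : Decidable (Spec_find_streak list element size out) := by unfold Spec_find_streak; infer_instance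

-- ===== CLAIM (what is proved, stated in full; the proofs are below) =====
def Claim_equal_find_streak : Prop := ∀ (list : List Int) (element : Int) (size : Int), Dom_find_streak list element size → Spec_find_streak list element size (find_streak list element size)

-- ===== LEMMAS AND PROOFS =====

-- reference scanner: true iff, continuing a current run of length c, a run of `element` of length ≥ size appears
def pvChk (element size : Int) : List Int → Int → Bool
  | [], _ => false
  | x :: rest, c =>
    if x = element then (if size ≤ c + 1 then true else pvChk element size rest (c + 1))
    else pvChk element size rest 0

-- length of the maximal prefix of xs equal to e, as an Int
def pvCnt (e : Int) : List Int → Int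
  | [] => 0
  | x :: r => if x = e then pvCnt e r + 1 else 0

def pvDrop (e : Int) : List Int → List Int
  | [] => []
  | x :: r => if x = e then pvDrop e r else x :: r

theorem pvCnt_nonneg (e : Int) (xs : List Int) : 0 ≤ pvCnt e xs := by
  induction xs with
  | nil => simp [pvCnt]
  | cons x r ih => simp only [pvCnt]; split <;> omega

theorem pvDrop_length (e : Int) (xs : List Int) : (pvDrop e xs).length ≤ xs.length := by
  induction xs with
  | nil => simp [pvDrop]
  | cons x r ih => simp only [pvDrop]; split <;> simp; omega

theorem pvLoopA_chk (element size : Int) (xs : List Int) :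
    ∀ c s, 0 < size → 0 ≤ c → c < size →
    (((pvLoopA element size xs c s).2 && decide (size ≤ (pvLoopA element size xs c s).1)) = pvChk element size xs c) := by
  induction xs with
  | nil =>
    intro c s hs h0 hc
    rw [pvLoopA.eq_def]
    simp [pvChk, hc, not_le.mpr hc]
  | cons x rest ih =>
    intro c s hs h0 hc
    rw [pvLoopA.eq_def]
    simp only [if_pos hc]
    by_cases hx : x = element
    · simp only [if_pos hx]
      by_cases h1 : size ≤ c + 1
      · have : ¬ (c + 1 < size) := by omega
        rw [pvLoopA.eq_def]
        simp [this, pvChk, hx, h1]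
      · rw [ih (c + 1) true hs (by omega) (by omega)]
        simp [pvChk, hx, h1]
    · simp only [if_neg hx]
      rw [ih 0 false hs le_rfl hs]
      simp [pvChk, hx]

theorem pvChk_split (element size : Int) (xs : List Int) :
    ∀ c, 0 < size → 0 ≤ c → c < size →
    pvChk element size xs c =
      (decide (size ≤ c + pvCnt element xs) || pvChk element size (pvDrop element xs) 0) := by
  induction xs with
  | nil =>
    intro c hs h0 hc
    simp [pvChk, pvCnt, pvDrop]; omega
  | cons x rest ih =>
    intro c hs h0 hc
    by_cases hx : x = element
    · simp only [pvChk, pvCnt, pvDrop, if_pos hx]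
      by_cases h1 : size ≤ c + 1
      · have hnn := pvCnt_nonneg element rest
        have : size ≤ c + (pvCnt element rest + 1) := by omega
        simp [this, h1]
      · rw [ih (c + 1) hs (by omega) (by omega)]
        have : (size ≤ c + (pvCnt element rest + 1)) ↔ (size ≤ c + 1 + pvCnt element rest) := by omega
        simp [h1, this]
    · simp only [pvChk, pvCnt, pvDrop, if_neg hx]
      have hle : ¬ size ≤ c := by omega
      simp [hle]

theorem pvRle_cons (x : Int) (xs : List Int) :
    pvRle (x :: xs) = (x, 1 + pvCnt x xs) :: pvRle (pvDrop x xs) := by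
  induction xs generalizing x with
  | nil => simp [pvRle, pvRleStep, pvCnt, pvDrop]
  | cons y r ih =>
    have h1 : pvRle (x :: y :: r) = pvRleStep x (pvRle (y :: r)) := rfl
    rw [h1, ih y]
    by_cases hxy : y = x
    · subst hxy
      norm_num [pvRleStep, pvCnt, pvDrop]
      omega
    · simp only [pvRleStep, pvCnt, pvDrop, if_neg hxy]
      rw [← ih y]
      norm_num

-- x ≠ element: skipping a prefix of x's does not change the scan started at 0
theorem pvChk_drop (element size x : Int) (hx : x ≠ element) (xs : List Int) :
    pvChk element size (pvDrop x xs) 0 = pvChk element size xs 0 := by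
  induction xs with
  | nil => simp [pvDrop]
  | cons y r ih =>
    simp only [pvDrop]
    by_cases hyx : y = x
    · rw [if_pos hyx, ih]
      have : y ≠ element := hyx ▸ hx
      simp [pvChk, this]
    · rw [if_neg hyx]

theorem pvAny_rle (element size : Int) (hs : 0 < size) :
    ∀ n (xs : List Int), xs.length ≤ n →
    (pvRle xs).any (fun p => p.1 == element && decide (size ≤ p.2)) = pvChk element size xs 0 := by
  intro n
  induction n with
  | zero =>
    intro xs h
    have : xs = [] := List.eq_nil_of_length_eq_zero (by omega)
    simp [this, pvRle, pvChk]
  | succ m ih =>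
    intro xs h
    match xs with
    | [] => simp [pvRle, pvChk]
    | x :: rest =>
      rw [pvRle_cons]
      have hlen : (pvDrop x rest).length ≤ m := by
        have := pvDrop_length x rest
        simp at h; omega
      rw [List.any_cons, ih _ hlen]
      rw [pvChk_split element size (x :: rest) 0 hs le_rfl hs]
      by_cases hx : x = element
      · subst hx
        simp only [pvCnt, pvDrop]
        have : (0 : Int) + (pvCnt x rest + 1) = 1 + pvCnt x rest := by ring
        simp [this]
      · have hxb : (x == element) = false := by simp [hx]
        simp only [pvCnt, pvDrop, if_neg hx, hxb, Bool.false_and, Bool.false_or]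
        have hd : ¬ size ≤ (0 : Int) := by omega
        simp [hd, pvChk, hx, pvChk_drop element size x hx rest]

-- ===== VERDICT (by name: the statement is the Claim_ definition above) =====
theorem find_streak_spec : Claim_equal_find_streak := by
  intro list element size _
  unfold Spec_find_streak find_streak find_streak_alt
  by_cases hs : 0 < size
  · rw [if_pos hs, if_neg (show ¬ size ≤ 0 by omega)]
    rw [pvAny_rle element size hs list.length list le_rfl]
    rw [← pvLoopA_chk element size list 0 false hs le_rfl hs]
    cases h : (pvLoopA element size list 0 false).2 <;> simp [h]
  · rw [if_neg hs, if_pos (show size ≤ 0 by omega)]
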